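-- pv_equiv track=rewrite | github.com/ANDYDEARING/mystery-word | mystery_word.py | make_init_evil_template
-- ===== SOURCE A (Python) =====
-- def get_frequency_value(word_tup):
--         """Given a tuple, returns the second value"""
--         return word_tup[1]
--
-- def make_init_evil_template(evil_words_list):
--     """returns an evil word template of random length, accepting an evil_words_list
--     and choosing the word length that maximizes potential words, which it then uses
--     to return a template of that length"""
--
--     # default value
--     max_words_in_length_of = 1
--     word_length_freq = {}
--
--     # iterate through the words list and sort by frequency of length,
--     # discovering the highest and storing it in max_words_in_length_of
--     for word in evil_words_list:
--         try:
--             word_length_freq[len(word)] += 1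
--         except:
--             word_length_freq[len(word)] = 1
--
--     max_words_in_length_of = sorted(
--         word_length_freq.items(), key=get_frequency_value, reverse = True)[0][0]
--
--     # make a template of length max_words_in_length_of
--     evil_word_template = []
--     for _ in range(max_words_in_length_of):
--         evil_word_template.append("_")
--     return evil_word_template
-- ===== SOURCE B (Python) =====
-- def make_init_evil_template(evil_words_list):
--     """Same result as A: the word length occurring most often wins (earliest
--     first-occurring length on ties); returns that many underscores.
--     No dict: a direct argmax-by-count scan over the lengths list."""
--     lengths = [len(word) for word in evil_words_list]
--     best = lengths[0]
--     best_count = lengths.count(best)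
--     for n in lengths:
--         c = lengths.count(n)
--         if c > best_count:
--             best = n
--             best_count = c
--     return ["_"] * best
-- ===== Notes on version B (the rewrite author's own statement) =====
-- stated objective: simpler
-- what changed: Drops A's frequency dict and full descending sort entirely: B builds the plain lengths list and does a direct argmax-by-count scan (lengths.count with a strict-improvement update, so the first-occurring length wins ties, matching A's insertion-order stable sort), then builds the template by list multiplication instead of an append loop.
import Mathlib
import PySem

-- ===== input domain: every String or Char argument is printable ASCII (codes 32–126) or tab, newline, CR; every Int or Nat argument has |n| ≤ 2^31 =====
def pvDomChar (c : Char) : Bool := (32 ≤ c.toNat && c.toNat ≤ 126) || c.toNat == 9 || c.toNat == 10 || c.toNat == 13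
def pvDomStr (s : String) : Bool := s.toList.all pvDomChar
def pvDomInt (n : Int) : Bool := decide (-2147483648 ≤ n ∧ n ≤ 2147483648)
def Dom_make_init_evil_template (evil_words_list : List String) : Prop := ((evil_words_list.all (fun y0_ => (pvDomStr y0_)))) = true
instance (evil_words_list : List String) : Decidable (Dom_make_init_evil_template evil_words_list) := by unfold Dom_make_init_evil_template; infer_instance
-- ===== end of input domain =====

-- B drops A's frequency dict and descending sort: it scans the plain lengths list with an
-- argmax-by-count (strict-improvement, so the first-occurring length wins ties) — simpler, same values.

-- ===== PORT A =====
def make_init_evil_template (evil_words_list : List String) : List String :=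
  -- for word in …: try d[len(word)] += 1 except: d[len(word)] = 1
  let word_length_freq : PySem.Dict Int Int :=
    evil_words_list.foldl (fun d word =>
      match d.get? (PySem.Str.len word) with
      | some v => d.insert (PySem.Str.len word) (v + 1)   -- d[k] += 1
      | none   => d.insert (PySem.Str.len word) 1) PySem.Dict.empty   -- except: d[k] = 1
  -- sorted(items, key=get_frequency_value, reverse=True)[0][0]  ([0] = IndexError on empty, excluded by Pre_)
  let max_words_in_length_of : Int :=
    (PySem.List.pyGetD (PySem.List.sorted word_length_freq.items (fun p => p.2) true) 0 (0, 0)).1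
  -- for _ in range(…): template.append("_")
  (PySem.List.pyRange 0 max_words_in_length_of 1).foldl (fun acc _ => acc ++ ["_"]) []

-- ===== PORT B =====
def make_init_evil_template_alt (evil_words_list : List String) : List String :=
  -- lengths = [len(word) for word in evil_words_list]
  let lengths : List Int := evil_words_list.map (fun word => PySem.Str.len word)
  -- best = lengths[0]  (IndexError on empty, excluded by Pre_)
  match PySem.List.pyGet? lengths 0 with
  | none => []
  | some best0 =>
    -- for n in lengths: c = lengths.count(n); if c > best_count: best, best_count = n, c
    let best : Int × Int :=
      lengths.foldl (fun bc n =>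
          let c : Int := (PySem.List.count lengths n : Int)
          if bc.2 < c then (n, c) else bc)
        (best0, (PySem.List.count lengths best0 : Int))
    -- ["_"] * best
    PySem.List.pyRepeat ["_"] best.1

-- ===== PRECONDITION & SPEC =====
-- Pre_ excludes only the empty list, on which both A and B raise IndexError.
def Pre_make_init_evil_template (evil_words_list : List String) : Prop := evil_words_list ≠ []
instance (evil_words_list : List String) : Decidable (Pre_make_init_evil_template evil_words_list) := by unfold Pre_make_init_evil_template; infer_instance
def pvWitness_make_init_evil_template : List String := ["cat", "dog", "bird"]

def Spec_make_init_evil_template (evil_words_list : List String) (out : List String) : Prop := out = make_init_evil_template_alt evil_words_list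
instance (evil_words_list : List String) (out : List String) : Decidable (Spec_make_init_evil_template evil_words_list out) := by unfold Spec_make_init_evil_template; infer_instance

-- ===== CLAIM (what is proved, stated in full; the proofs are below) =====
def Claim_equal_make_init_evil_template : Prop := ∀ (evil_words_list : List String), Dom_make_init_evil_template evil_words_list → Pre_make_init_evil_template evil_words_list → Spec_make_init_evil_template evil_words_list (make_init_evil_template evil_words_list)

-- ===== LEMMAS AND PROOFS =====

-- A's try/except counting step is the insert/getD counting step
theorem count_step_eq (d : PySem.Dict Int Int) (word : String) :
    (match d.get? (PySem.Str.len word) with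
      | some v => d.insert (PySem.Str.len word) (v + 1)
      | none   => d.insert (PySem.Str.len word) 1) =
    d.insert (PySem.Str.len word) (d.getD (PySem.Str.len word) 0 + 1) := by
  rw [PySem.Dict.getD_eq_get?_getD]
  cases h : d.get? (PySem.Str.len word) <;> simp

-- head of a stable reverse sort = Python's max (first maximal element)
theorem head?_sorted_rev_eq_max? {α : Type} (xs : List α) (key : α → Int) :
    (PySem.List.sorted xs key true).head? = PySem.List.max? xs key := by
  rw [PySem.List.sorted_rev_eq_foldl_insertBy]
  show (xs.foldl (fun acc x => PySem.List.insertBy (fun a b => decide (key b < key a)) x acc) []).head?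
      = PySem.List.max? xs key
  unfold PySem.List.max?
  suffices h : ∀ (acc : List α),
      (xs.foldl (fun acc x => PySem.List.insertBy (fun a b => decide (key b < key a)) x acc) acc).head?
        = xs.foldl (fun m x => match m with
            | none => some x
            | some m => if key m < key x then some x else some m) acc.head? by
    simpa using h []
  induction xs with
  | nil => intro acc; simp
  | cons x xs ih =>
    intro acc
    simp only [List.foldl_cons]
    rw [ih]
    congr 1
    cases acc with
    | nil => simp [PySem.List.insertBy]
    | cons y ys =>
      by_cases h : key y < key x <;> simp [PySem.List.insertBy, h]

-- A's append loop over range(n) builds n underscores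
theorem underscore_loop_eq_replicate (n : Int) :
    (PySem.List.pyRange 0 n 1).foldl (fun acc _ => acc ++ ["_"]) [] =
      List.replicate n.toNat "_" := by
  rw [PySem.List.foldl_append_singleton_eq_map]
  simp only [List.nil_append]
  rw [List.eq_replicate_iff]
  constructor
  · rw [List.length_map]
    simp [PySem.List.length_pyRange_one]
  · intro b hb
    simp at hb
    obtain ⟨a, _, rfl⟩ := hb
    rfl

-- Python's max over a nonempty list is the running pairwise maximum (first maximum kept)
theorem max?_cons_eq_foldl {α : Type} (key : α → Int) :
    ∀ (xs : List α) (x : α),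
      PySem.List.max? (x :: xs) key
        = some (xs.foldl (fun q k => if key q < key k then k else q) x) := by
  have hrec : ∀ (x y : α) (xs : List α),
      PySem.List.max? (x :: y :: xs) key
        = PySem.List.max? ((if key x < key y then y else x) :: xs) key := by
    intro x y xs
    by_cases h : key x < key y <;> simp [PySem.List.max?, h]
  intro xs
  induction xs with
  | nil => intro x; rfl
  | cons y xs ih =>
    intro x
    rw [hrec, ih, List.foldl_cons]

-- the argmax-by-count scan ignores repeated elements: folding over the whole list equals
-- folding over the new elements appended by the Set.add loop, whenever every element of the
-- starting set is already dominated by the accumulator's count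
theorem foldl_scan_dedup (cnt : Int → Int) :
    ∀ (l s : List Int) (acc : Int × Int),
      (∀ n ∈ s, cnt n ≤ acc.2) →
      ∃ t, l.foldl PySem.Set.add s = s ++ t ∧
        t.foldl (fun bc n => if bc.2 < cnt n then (n, cnt n) else bc) acc
          = l.foldl (fun bc n => if bc.2 < cnt n then (n, cnt n) else bc) acc := by
  intro l
  induction l with
  | nil => intro s acc _; exact ⟨[], by simp⟩
  | cons n l ih =>
    intro s acc hs
    by_cases hn : n ∈ s
    · have hstep : (if acc.2 < cnt n then (n, cnt n) else acc) = acc := by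
        rw [if_neg (not_lt.mpr (hs n hn))]
      obtain ⟨t, h1, h2⟩ := ih s acc hs
      refine ⟨t, ?_, ?_⟩
      · simpa [PySem.Set.add, hn] using h1
      · simp only [List.foldl_cons, hstep]
        exact h2
    · set acc' := if acc.2 < cnt n then (n, cnt n) else acc with hacc'
      have hdom : ∀ m ∈ s ++ [n], cnt m ≤ acc'.2 := by
        intro m hm
        have h2 : acc.2 ≤ acc'.2 ∧ cnt n ≤ acc'.2 := by
          rw [hacc']; split_ifs with h <;> simp <;> omega
        rcases List.mem_append.mp hm with hm | hm
        · exact le_trans (hs m hm) h2.1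
        · simp at hm; subst hm; exact h2.2
      obtain ⟨t, h1, h2⟩ := ih (s ++ [n]) acc' hdom
      refine ⟨n :: t, ?_, ?_⟩
      · have : PySem.Set.add s n = s ++ [n] := by simp [PySem.Set.add, hn]
        simp only [List.foldl_cons, this, h1, List.append_assoc, List.singleton_append]
      · simp only [List.foldl_cons, ← hacc']
        exact h2


-- the whole computation on the nonempty lengths list a :: L'
theorem evil_core (a : Int) (L' : List Int) :
    (PySem.List.pyRange 0
        (PySem.List.pyGetD (PySem.List.sorted
          (((a :: L').foldl (fun d x => d.insert x (d.getD x 0 + 1))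
            (PySem.Dict.empty : PySem.Dict Int Int)).items) (fun p => p.2) true) 0 (0, 0)).1
        1).foldl (fun acc _ => acc ++ ["_"]) []
    = match PySem.List.pyGet? (a :: L') 0 with
      | none => []
      | some best0 =>
        PySem.List.pyRepeat ["_"]
          ((a :: L').foldl (fun bc n =>
              let c : Int := (PySem.List.count (a :: L') n : Int)
              if bc.2 < c then (n, c) else bc)
            (best0, (PySem.List.count (a :: L') best0 : Int))).1 := by
  rw [PySem.Dict.foldl_insert_getD_add_one_eq_counter, PySem.Dict.items_counter]
  set cnt : Int → Int := fun n => (PySem.List.count (a :: L') n : Int) with hcnt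
  set f : Int → Int × Int := fun k => (k, ((a :: L').count k : Int)) with hf
  set g : Int × Int → Int → Int × Int :=
    fun bc n => if bc.2 < cnt n then (n, cnt n) else bc with hg
  -- decompose the dedup of a :: L'
  obtain ⟨t, hset, hscan⟩ := foldl_scan_dedup cnt L' [a] (a, cnt a)
    (by intro n hn; simp at hn; subst hn; exact le_refl _)
  rw [← hg] at hscan
  have hD : PySem.Set.ofList (a :: L') = a :: t := by
    rw [PySem.Set.ofList_eq_foldl]
    simp only [List.foldl_cons]
    rw [show PySem.Set.add [] a = [a] from rfl]
    simpa using hset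
  rw [hD]
  have hfa : f a = (a, cnt a) := by simp [hf, hcnt, PySem.List.count_eq]
  -- A's max? over the items equals B's pair scan
  have hmax : PySem.List.max? ((a :: t).map f) (fun p => p.2)
      = some (L'.foldl g (a, cnt a)) := by
    rw [show (a :: t).map f = f a :: t.map f from rfl,
      max?_cons_eq_foldl (fun p => p.2) (t.map f) (f a), List.foldl_map]
    rw [show (fun (x : Int × Int) (y : Int) => if x.2 < (f y).2 then f y else x) = g by
      funext q k; simp [hf, hg, hcnt, PySem.List.count_eq]]
    rw [hfa, hscan]
  -- B's match and first loop step
  rw [show PySem.List.pyGet? (a :: L') 0 = some a from PySem.List.pyGet?_zero_cons a L']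
  -- extract the head of the sorted list from hmax
  have hhead := head?_sorted_rev_eq_max? ((a :: t).map f) (fun p => p.2)
  rw [hmax] at hhead
  obtain ⟨rs, hs⟩ : ∃ rs, PySem.List.sorted ((a :: t).map f) (fun p => p.2) true
      = (L'.foldl g (a, cnt a)) :: rs := by
    cases hsort : PySem.List.sorted ((a :: t).map f) (fun p => p.2) true with
    | nil => rw [hsort] at hhead; simp at hhead
    | cons x xs => rw [hsort] at hhead; simp at hhead; exact ⟨xs, by rw [hhead]⟩
  rw [hs, PySem.List.pyGetD_zero_cons, underscore_loop_eq_replicate]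
  -- reduce B's match (iota) and its redundant first loop step
  show List.replicate (L'.foldl g (a, cnt a)).1.toNat "_"
      = PySem.List.pyRepeat ["_"] ((a :: L').foldl g (a, cnt a)).1
  rw [PySem.List.pyRepeat_singleton,
    show (a :: L').foldl g (a, cnt a) = L'.foldl g (a, cnt a) by
      rw [List.foldl_cons, show g (a, cnt a) a = (a, cnt a) by simp [hg]]]

-- ===== VERDICT (by name: the statement is the Claim_ definition above) =====
theorem make_init_evil_template_spec : Claim_equal_make_init_evil_template := by
  intro ws _ hpre
  unfold Spec_make_init_evil_template make_init_evil_template make_init_evil_template_alt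
  obtain ⟨w, rest, rfl⟩ : ∃ w rest, ws = w :: rest := by
    cases ws with
    | nil => exact absurd rfl hpre
    | cons w rest => exact ⟨w, rest, rfl⟩
  simp only [funext fun d => funext fun word => count_step_eq d word]
  rw [show ((w :: rest).foldl (fun d word =>
        d.insert (PySem.Str.len word) (d.getD (PySem.Str.len word) 0 + 1))
        (PySem.Dict.empty : PySem.Dict Int Int))
      = ((w :: rest).map (fun word => PySem.Str.len word)).foldl
          (fun d x => d.insert x (d.getD x 0 + 1)) PySem.Dict.empty
    from (List.foldl_map (f := fun word => PySem.Str.len word) (g := fun (d : PySem.Dict Int Int) (x : Int) => d.insert x (d.getD x 0 + 1)) (l := w :: rest) (init := PySem.Dict.empty)).symm]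
  simp only [List.map_cons]
  exact evil_core (PySem.Str.len w) (rest.map (fun word => PySem.Str.len word))
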